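-- pv_equiv track=rewrite | github.com/Duc1445/MusicMoodBot | backend/src/pipelines/smart_recommendation.py | _is_similar_mood
-- ===== SOURCE A (Python) =====
-- def _is_similar_mood(mood1: str, mood2: str) -> bool:
--     """Check if moods are similar"""
--     similar_groups = [
--         {'energetic', 'happy'},
--         {'sad', 'stress'},
--         {'stress', 'angry'}
--     ]
--     for group in similar_groups:
--         if mood1 in group and mood2 in group:
--             return True
--     return False
-- ===== SOURCE B (Python) =====
-- def _is_similar_mood(mood1: str, mood2: str) -> bool:
--     """Check if moods are similar"""
--     similar_groups = [
--         {'energetic', 'happy'},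
--         {'sad', 'stress'},
--         {'stress', 'angry'}
--     ]
--     groups_of = {}
--     for i, group in enumerate(similar_groups):
--         for mood in group:
--             groups_of.setdefault(mood, set()).add(i)
--     return bool(groups_of.get(mood1, set()) & groups_of.get(mood2, set()))
-- ===== Notes on version B (the rewrite author's own statement) =====
-- stated objective: alternative
-- what changed: Replaces the linear scan over the three mood groups by a precomputed mood-to-group-index-set map built once with enumerate, answering via a nonempty intersection of the two index sets.
import Mathlib
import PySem

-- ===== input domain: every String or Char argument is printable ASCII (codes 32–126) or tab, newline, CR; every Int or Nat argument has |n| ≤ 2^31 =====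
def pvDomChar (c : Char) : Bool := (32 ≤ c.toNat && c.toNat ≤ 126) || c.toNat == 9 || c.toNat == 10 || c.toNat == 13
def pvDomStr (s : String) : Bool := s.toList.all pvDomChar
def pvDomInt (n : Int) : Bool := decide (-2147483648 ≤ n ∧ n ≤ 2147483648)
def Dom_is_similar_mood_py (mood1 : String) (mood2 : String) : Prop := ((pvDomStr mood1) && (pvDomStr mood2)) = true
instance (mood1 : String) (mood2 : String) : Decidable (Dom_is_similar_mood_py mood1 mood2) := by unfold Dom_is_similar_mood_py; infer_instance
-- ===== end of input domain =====

-- B replaces A's linear scan over the three groups by a precomputed mood → group-index-set map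
-- and an index-set intersection test (alternative decomposition, same cost at this size).

-- ===== PORT A =====
-- the 'for group in similar_groups' loop with early 'return True'
def pvALoop (mood1 : String) (mood2 : String) : List (PySem.Set String) → Bool
  | [] => false
  | g :: rest =>
      if PySem.Set.contains g mood1 && PySem.Set.contains g mood2 then true
      else pvALoop mood1 mood2 rest

def is_similar_mood_py (mood1 : String) (mood2 : String) : Bool :=
  let similar_groups : List (PySem.Set String) :=
    [PySem.Set.ofList ["energetic", "happy"],
     PySem.Set.ofList ["sad", "stress"],
     PySem.Set.ofList ["stress", "angry"]]
  pvALoop mood1 mood2 similar_groups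

-- ===== PORT B =====
-- the 'groups_of' map built by the enumerate loop (constant: it does not depend on the arguments)
def pvGroupsOf : PySem.Dict String (PySem.Set Int) :=
  let similar_groups : List (PySem.Set String) :=
    [PySem.Set.ofList ["energetic", "happy"],
     PySem.Set.ofList ["sad", "stress"],
     PySem.Set.ofList ["stress", "angry"]]
  (PySem.List.enumerate similar_groups).foldl
    (fun d p =>
      p.2.foldl
        (fun d mood =>
          d.insert mood (PySem.Set.add (d.getD mood PySem.Set.empty) p.1)) d)
    PySem.Dict.empty

def is_similar_mood_py_alt (mood1 : String) (mood2 : String) : Bool :=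
  !(PySem.Set.inter (pvGroupsOf.getD mood1 PySem.Set.empty)
                    (pvGroupsOf.getD mood2 PySem.Set.empty)).isEmpty

-- ===== PRECONDITION & SPEC =====
def Spec_is_similar_mood_py (mood1 : String) (mood2 : String) (out : Bool) : Prop := out = is_similar_mood_py_alt mood1 mood2
instance (mood1 : String) (mood2 : String) (out : Bool) : Decidable (Spec_is_similar_mood_py mood1 mood2 out) := by unfold Spec_is_similar_mood_py; infer_instance

-- ===== CLAIM (what is proved, stated in full; the proofs are below) =====
def Claim_equal_is_similar_mood_py : Prop := ∀ (mood1 : String) (mood2 : String), Dom_is_similar_mood_py mood1 mood2 → Spec_is_similar_mood_py mood1 mood2 (is_similar_mood_py mood1 mood2)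

-- ===== LEMMAS AND PROOFS =====
theorem pvGroupsOf_eval :
    pvGroupsOf = PySem.Dict.mk
      [("energetic", [0]), ("happy", [0]), ("sad", [1]), ("stress", [1, 2]), ("angry", [2])] := by
  decide

theorem pv_charA (m1 m2 : String) :
    is_similar_mood_py m1 m2 =
      ((decide (m1 = "energetic") || decide (m1 = "happy")) &&
        (decide (m2 = "energetic") || decide (m2 = "happy")) ||
      ((decide (m1 = "sad") || decide (m1 = "stress")) &&
        (decide (m2 = "sad") || decide (m2 = "stress")) ||
       (decide (m1 = "stress") || decide (m1 = "angry")) &&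
        (decide (m2 = "stress") || decide (m2 = "angry")))) := by
  simp only [is_similar_mood_py, pvALoop, PySem.Set.ofList, PySem.Set.contains,
    PySem.Set.add, PySem.Set.empty, List.foldl_cons, List.foldl_nil]
  simp [Bool.if_true_left]

theorem pv_charB (m1 m2 : String) :
    is_similar_mood_py_alt m1 m2 =
      ((decide (m1 = "energetic") || decide (m1 = "happy")) &&
        (decide (m2 = "energetic") || decide (m2 = "happy")) ||
      ((decide (m1 = "sad") || decide (m1 = "stress")) &&
        (decide (m2 = "sad") || decide (m2 = "stress")) ||
       (decide (m1 = "stress") || decide (m1 = "angry")) &&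
        (decide (m2 = "stress") || decide (m2 = "angry")))) := by
  simp only [is_similar_mood_py_alt, pvGroupsOf_eval, PySem.Dict.getD,
    PySem.Dict.get?_mk_cons, PySem.Set.inter, PySem.Set.contains, PySem.Set.empty]
  split_ifs <;> simp_all [PySem.Dict.get?] <;> subst_vars <;> (try simp_all [eq_comm])

-- ===== VERDICT (by name: the statement is the Claim_ definition above) =====
theorem is_similar_mood_py_spec : Claim_equal_is_similar_mood_py := by
  intro m1 m2 _
  unfold Spec_is_similar_mood_py
  rw [pv_charA, pv_charB]
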